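-- pv_equiv track=rewrite | github.com/kritikarag/Practice | min_health.py | findminhealth
-- ===== SOURCE A (Python) =====
-- def findminhealth(power,armor):
--     n=len(power)
--     ans=0
--     arm=True
--     for i in range(n):
--         if power[i]>armor and arm==True:
--             ans+=power[i]-armor
--             arm=False
--         else:
--             ans+=power[i]
--     if arm == True:
--         temp = max(power)
--         ans-=temp
--         arm=False
--     return ans+1
-- ===== SOURCE B (Python) =====
-- def findminhealth(power, armor):
--     m = max(power)
--     total = sum(power)
--     return total - (armor if m > armor else m) + 1
-- ===== Notes on version B (the rewrite author's own statement) =====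
-- stated objective: simpler
-- what changed: Replaced A's stateful single pass (mutable boolean flag marking the first element exceeding armor) with aggregate sum/max computation and one closed-form branch: total - armor + 1 if max > armor else total - max + 1.
import Mathlib
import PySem

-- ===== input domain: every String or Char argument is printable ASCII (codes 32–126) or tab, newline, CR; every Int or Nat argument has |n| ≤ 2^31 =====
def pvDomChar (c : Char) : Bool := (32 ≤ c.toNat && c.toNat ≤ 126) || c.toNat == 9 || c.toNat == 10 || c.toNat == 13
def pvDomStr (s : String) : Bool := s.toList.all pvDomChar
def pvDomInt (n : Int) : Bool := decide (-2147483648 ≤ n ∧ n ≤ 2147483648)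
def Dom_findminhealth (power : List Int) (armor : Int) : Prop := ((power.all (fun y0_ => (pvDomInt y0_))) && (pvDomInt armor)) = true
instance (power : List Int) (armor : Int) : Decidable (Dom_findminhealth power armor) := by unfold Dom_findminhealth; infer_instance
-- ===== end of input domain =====

-- B replaces A's stateful single pass (boolean flag on the first element exceeding armor)
-- with aggregate sum/max and one closed-form branch (objective: simpler).


-- ===== PORT A =====
def findminhealth (power : List Int) (armor : Int) : Int :=
  let n : Int := PySem.List.len power
  let st : Int × Bool := (PySem.List.pyRange 0 n 1).foldl
    (fun (s : Int × Bool) i =>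
      if PySem.List.pyGetD power i 0 > armor ∧ s.2 = true then
        (s.1 + (PySem.List.pyGetD power i 0 - armor), false)
      else (s.1 + PySem.List.pyGetD power i 0, s.2)) (0, true)
  let st2 : Int × Bool :=
    if st.2 = true then (st.1 - (PySem.List.max? power (fun y => y)).getD 0, false) else st
  st2.1 + 1

-- ===== PORT B =====
def findminhealth_alt (power : List Int) (armor : Int) : Int :=
  let m := (PySem.List.max? power (fun y => y)).getD 0
  let total := power.sum
  total - (if m > armor then armor else m) + 1

-- ===== PRECONDITION & SPEC =====
-- Pre_ excludes only the empty list, on which A (and B) raise ValueError from max([]).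
def Pre_findminhealth (power : List Int) (armor : Int) : Prop := power ≠ []
instance (power : List Int) (armor : Int) : Decidable (Pre_findminhealth power armor) := by unfold Pre_findminhealth; infer_instance
def pvWitness_findminhealth : List Int × Int := ([3, 1, 5], 2)

def Spec_findminhealth (power : List Int) (armor : Int) (out : Int) : Prop := out = findminhealth_alt power armor
instance (power : List Int) (armor : Int) (out : Int) : Decidable (Spec_findminhealth power armor out) := by unfold Spec_findminhealth; infer_instance

-- ===== CLAIM (what is proved, stated in full; the proofs are below) =====
def Claim_equal_findminhealth : Prop := ∀ (power : List Int) (armor : Int), Dom_findminhealth power armor → Pre_findminhealth power armor → Spec_findminhealth power armor (findminhealth power armor)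

-- ===== LEMMAS AND PROOFS =====

-- once the flag is false, the loop just adds the remaining elements
lemma pv_loop_false (armor : Int) (l : List Int) (a : Int) :
    l.foldl (fun (s : Int × Bool) p =>
      if p > armor ∧ s.2 = true then (s.1 + (p - armor), false) else (s.1 + p, s.2)) (a, false)
    = (a + l.sum, false) := by
  induction l generalizing a with
  | nil => simp
  | cons x t ih => simp [ih]; ring

-- loop characterisation with the flag true
lemma pv_loop_true (armor : Int) (l : List Int) (a : Int) :
    l.foldl (fun (s : Int × Bool) p =>
      if p > armor ∧ s.2 = true then (s.1 + (p - armor), false) else (s.1 + p, s.2)) (a, true)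
    = (a + l.sum - (if l.any (fun p => decide (armor < p)) then armor else 0),
       !l.any (fun p => decide (armor < p))) := by
  induction l generalizing a with
  | nil => simp
  | cons x t ih =>
    by_cases hx : armor < x
    · simp only [List.foldl_cons, List.any_cons, hx]
      rw [if_pos (by simpa using hx)]
      rw [pv_loop_false]
      simp [List.sum_cons]; ring
    · simp only [List.foldl_cons, List.any_cons]
      rw [if_neg (by simp [hx])]
      rw [ih]
      simp [hx, List.sum_cons]
      ring

lemma pv_max_gt_iff (power : List Int) (armor : Int) (h : power ≠ []) :
    (armor < (PySem.List.max? power (fun y => y)).getD 0)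
    ↔ power.any (fun p => decide (armor < p)) = true := by
  obtain ⟨m, hm⟩ : ∃ m, PySem.List.max? power (fun y => y) = some m := by
    cases hmq : PySem.List.max? power (fun y => y) with
    | none => exact absurd ((PySem.List.max?_eq_none_iff power (fun y => y)).mp hmq) h
    | some m => exact ⟨m, rfl⟩
  rw [hm]
  constructor
  · intro hgt
    simp only [List.any_eq_true]
    exact ⟨m, PySem.List.max?_mem hm, by simpa using hgt⟩
  · intro hany
    simp only [List.any_eq_true] at hany
    obtain ⟨p, hp, hpgt⟩ := hany
    have := PySem.List.max?_isMax hm p hp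
    simp at hpgt ⊢
    omega

-- ===== VERDICT (by name: the statement is the Claim_ definition above) =====
theorem findminhealth_spec : Claim_equal_findminhealth := by
  intro power armor _ hpre
  unfold Spec_findminhealth findminhealth findminhealth_alt
  simp only [PySem.List.len]
  rw [PySem.List.foldl_pyRange_zero_pyGetD' power 0
    (fun (s : Int × Bool) p =>
      if p > armor ∧ s.2 = true then (s.1 + (p - armor), false) else (s.1 + p, s.2)) (0, true)]
  rw [pv_loop_true]
  by_cases hany : power.any (fun p => decide (armor < p)) = true
  · have hm := (pv_max_gt_iff power armor hpre).mpr hany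
    simp [hany, hm]
  · have hm : ¬ armor < (PySem.List.max? power (fun y => y)).getD 0 := fun hc =>
      hany ((pv_max_gt_iff power armor hpre).mp hc)
    simp only [Bool.not_eq_true] at hany
    simp [hany, hm]
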